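-- pv_equiv track=rewrite | github.com/PandaHero/tableau-ai-analysis-assistant | tableau_assistant/tests/property/test_insight_properties.py | _get_chunking_priority
-- ===== SOURCE A (Python) =====
-- from typing import Any, Dict, List
--
-- def _get_chunking_priority(dimension_hierarchy: Dict) -> List[str]:
--     """获取分块优先级"""
--     priority_order = {"time": 0, "product": 1, "geographic": 2}
--
--     dims = []
--     for name, attrs in dimension_hierarchy.items():
--         category = attrs.get("category", "other")
--         priority = priority_order.get(category, 99)
--         dims.append((name, priority))
--
--     dims.sort(key=lambda x: x[1])
--     return [d[0] for d in dims]
-- ===== SOURCE B (Python) =====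
-- from typing import Dict, List
--
-- def _get_chunking_priority(dimension_hierarchy: Dict) -> List[str]:
--     """获取分块优先级 — bucket version: one pass grouping into priority buckets, no sort."""
--     time_b, product_b, geo_b, other_b = [], [], [], []
--     for name, attrs in dimension_hierarchy.items():
--         cat = attrs.get("category", "other")
--         if cat == "time":
--             time_b.append(name)
--         elif cat == "product":
--             product_b.append(name)
--         elif cat == "geographic":
--             geo_b.append(name)
--         else:
--             other_b.append(name)
--     return time_b + product_b + geo_b + other_b
-- ===== Notes on version B (the rewrite author's own statement) =====
-- stated objective: alternative
-- what changed: Replaces build-pairs-then-stable-sort with a single-pass bucket (counting) grouping into four priority buckets concatenated in order; no sort at all.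
import Mathlib
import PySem

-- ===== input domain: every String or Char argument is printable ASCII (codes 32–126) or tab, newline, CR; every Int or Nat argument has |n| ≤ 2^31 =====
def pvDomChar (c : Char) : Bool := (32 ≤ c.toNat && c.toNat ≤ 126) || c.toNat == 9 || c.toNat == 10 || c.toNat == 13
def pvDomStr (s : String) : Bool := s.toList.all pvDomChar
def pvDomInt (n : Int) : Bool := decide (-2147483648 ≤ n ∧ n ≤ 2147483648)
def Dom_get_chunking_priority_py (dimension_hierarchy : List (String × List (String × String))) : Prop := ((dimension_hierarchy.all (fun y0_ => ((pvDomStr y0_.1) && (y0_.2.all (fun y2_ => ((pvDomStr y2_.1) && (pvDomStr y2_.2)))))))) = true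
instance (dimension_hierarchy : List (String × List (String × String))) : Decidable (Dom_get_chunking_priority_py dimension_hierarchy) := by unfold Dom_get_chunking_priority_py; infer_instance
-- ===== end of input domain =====

-- B replaces build-pairs-then-stable-sort with a single pass into four priority buckets concatenated in order (no sort); objective: alternative algorithm.

-- ===== PORT A =====
def get_chunking_priority_py (dimension_hierarchy : List (String × List (String × String))) : List String :=
  let priority_order : PySem.Dict String Int := ⟨[("time", 0), ("product", 1), ("geographic", 2)]⟩
  let dims : List (String × Int) := dimension_hierarchy.foldl
    (fun dims p =>
      let category := PySem.Dict.getD ⟨p.2⟩ "category" "other"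
      let priority := PySem.Dict.getD priority_order category 99
      dims ++ [(p.1, priority)]) []
  (PySem.List.sorted dims (fun x => x.2) false).map (fun d => d.1)

-- ===== PORT B =====
def get_chunking_priority_py_alt (dimension_hierarchy : List (String × List (String × String))) : List String :=
  let st := dimension_hierarchy.foldl
    (fun (st : List String × List String × List String × List String) p =>
      let cat := PySem.Dict.getD ⟨p.2⟩ "category" "other"
      if cat == "time" then (st.1 ++ [p.1], st.2.1, st.2.2.1, st.2.2.2)
      else if cat == "product" then (st.1, st.2.1 ++ [p.1], st.2.2.1, st.2.2.2)
      else if cat == "geographic" then (st.1, st.2.1, st.2.2.1 ++ [p.1], st.2.2.2)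
      else (st.1, st.2.1, st.2.2.1, st.2.2.2 ++ [p.1]))
    (([] : List String), ([] : List String), ([] : List String), ([] : List String))
  st.1 ++ st.2.1 ++ st.2.2.1 ++ st.2.2.2

-- ===== PRECONDITION & SPEC =====
def Spec_get_chunking_priority_py (dimension_hierarchy : List (String × List (String × String))) (out : List String) : Prop := out = get_chunking_priority_py_alt dimension_hierarchy
instance (dimension_hierarchy : List (String × List (String × String))) (out : List String) : Decidable (Spec_get_chunking_priority_py dimension_hierarchy out) := by unfold Spec_get_chunking_priority_py; infer_instance

-- ===== CLAIM (what is proved, stated in full; the proofs are below) =====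
def Claim_equal_get_chunking_priority_py : Prop := ∀ (dimension_hierarchy : List (String × List (String × String))), Dom_get_chunking_priority_py dimension_hierarchy → Spec_get_chunking_priority_py dimension_hierarchy (get_chunking_priority_py dimension_hierarchy)

-- ===== LEMMAS AND PROOFS =====

-- the category string both programs compute for one entry
def pvCat (p : String × List (String × String)) : String :=
  PySem.Dict.getD ⟨p.2⟩ "category" "other"

-- the priority A assigns to one entry
def pvPrio (p : String × List (String × String)) : Int :=
  if pvCat p = "time" then 0 else if pvCat p = "product" then 1
  else if pvCat p = "geographic" then 2 else 99

lemma pvPrio_eq (c : String) :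
    PySem.Dict.getD (⟨[("time", 0), ("product", 1), ("geographic", 2)]⟩ : PySem.Dict String Int)
      c 99 = (if c = "time" then 0 else if c = "product" then 1
              else if c = "geographic" then 2 else 99) := by
  simp only [PySem.Dict.getD, PySem.Dict.get?_mk_cons, beq_iff_eq]
  rcases eq_or_ne c "time" with h1 | h1
  · simp [h1]
  · rcases eq_or_ne c "product" with h2 | h2
    · simp [h2]
    · rcases eq_or_ne c "geographic" with h3 | h3
      · simp [h3]
      · simp [h1, h2, h3, Ne.symm h1, Ne.symm h2, Ne.symm h3, PySem.Dict.get?]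

lemma pvPrio_mem (p : String × List (String × String)) :
    pvPrio p = 0 ∨ pvPrio p = 1 ∨ pvPrio p = 2 ∨ pvPrio p = 99 := by
  unfold pvPrio; split_ifs <;> simp

lemma insertBy_append_of_not {α : Type} (before : α → α → Bool) (x : α) (l r : List α)
    (h : ∀ y ∈ l, before x y = false) :
    PySem.List.insertBy before x (l ++ r) = l ++ PySem.List.insertBy before x r := by
  induction l with
  | nil => rfl
  | cons a t ih =>
      simp only [List.cons_append, PySem.List.insertBy, h a (by simp)]
      simpa using ih (fun y hy => h y (by simp [hy]))

lemma insertBy_of_all_before {α : Type} (before : α → α → Bool) (x : α) (r : List α)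
    (h : ∀ y ∈ r, before x y = true) :
    PySem.List.insertBy before x r = x :: r := by
  cases r with
  | nil => rfl
  | cons a t => simp [PySem.List.insertBy, h a (by simp)]

lemma insertBy_split {α : Type} (before : α → α → Bool) (x : α) (l r : List α)
    (hl : ∀ y ∈ l, before x y = false) (hr : ∀ y ∈ r, before x y = true) :
    PySem.List.insertBy before x (l ++ r) = l ++ x :: r := by
  rw [insertBy_append_of_not before x l r hl, insertBy_of_all_before before x r hr]

-- invariant of the insertion sort over lists whose keys are 0/1/2/99
lemma sort_buckets (l : List (String × Int)) :
    ∀ (b0 b1 b2 b99 : List (String × Int)),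
    (∀ x ∈ l, x.2 = 0 ∨ x.2 = 1 ∨ x.2 = 2 ∨ x.2 = 99) →
    (∀ x ∈ b0, x.2 = 0) → (∀ x ∈ b1, x.2 = 1) → (∀ x ∈ b2, x.2 = 2) → (∀ x ∈ b99, x.2 = 99) →
    l.foldl (fun acc x => PySem.List.insertBy (fun a b => decide (a.2 < b.2)) x acc)
        (b0 ++ b1 ++ b2 ++ b99)
      = (b0 ++ l.filter (fun x => x.2 == 0)) ++ (b1 ++ l.filter (fun x => x.2 == 1))
        ++ (b2 ++ l.filter (fun x => x.2 == 2)) ++ (b99 ++ l.filter (fun x => x.2 == 99)) := by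
  induction l with
  | nil => intro b0 b1 b2 b99 _ _ _ _ _; simp
  | cons x t ih =>
      intro b0 b1 b2 b99 hl h0 h1 h2 h99
      simp only [List.foldl_cons]
      rcases hl x (by simp) with k | k | k | k
      · have e : b0 ++ b1 ++ b2 ++ b99 = b0 ++ (b1 ++ b2 ++ b99) := by
          simp [List.append_assoc]
        rw [e, insertBy_split _ x b0 (b1 ++ b2 ++ b99)
              (fun y hy => by simp only [h0 y hy, k]; decide)
              (fun y hy => by
                rcases List.mem_append.1 hy with hy | hy
                · rcases List.mem_append.1 hy with hy | hy
                  · simp only [h1 y hy, k]; decide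
                  · simp only [h2 y hy, k]; decide
                · simp only [h99 y hy, k]; decide),
            show b0 ++ x :: (b1 ++ b2 ++ b99) = (b0 ++ [x]) ++ b1 ++ b2 ++ b99 by
              simp [List.append_assoc],
            ih (b0 ++ [x]) b1 b2 b99 (fun y hy => hl y (by simp [hy]))
              (fun y hy => by
                rcases List.mem_append.1 hy with hy | hy
                · exact h0 y hy
                · simp at hy; simp [hy, k]) h1 h2 h99]
        simp [k, List.append_assoc]
      · have e : b0 ++ b1 ++ b2 ++ b99 = (b0 ++ b1) ++ (b2 ++ b99) := by
          simp [List.append_assoc]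
        rw [e, insertBy_split _ x (b0 ++ b1) (b2 ++ b99)
              (fun y hy => by
                rcases List.mem_append.1 hy with hy | hy
                · simp only [h0 y hy, k]; decide
                · simp only [h1 y hy, k]; decide)
              (fun y hy => by
                rcases List.mem_append.1 hy with hy | hy
                · simp only [h2 y hy, k]; decide
                · simp only [h99 y hy, k]; decide),
            show (b0 ++ b1) ++ x :: (b2 ++ b99) = b0 ++ (b1 ++ [x]) ++ b2 ++ b99 by
              simp [List.append_assoc],
            ih b0 (b1 ++ [x]) b2 b99 (fun y hy => hl y (by simp [hy])) h0
              (fun y hy => by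
                rcases List.mem_append.1 hy with hy | hy
                · exact h1 y hy
                · simp at hy; simp [hy, k]) h2 h99]
        simp [k, List.append_assoc]
      · have e : b0 ++ b1 ++ b2 ++ b99 = (b0 ++ b1 ++ b2) ++ b99 := by
          simp [List.append_assoc]
        rw [e, insertBy_split _ x (b0 ++ b1 ++ b2) b99
              (fun y hy => by
                rcases List.mem_append.1 hy with hy | hy
                · rcases List.mem_append.1 hy with hy | hy
                  · simp only [h0 y hy, k]; decide
                  · simp only [h1 y hy, k]; decide
                · simp only [h2 y hy, k]; decide)
              (fun y hy => by simp only [h99 y hy, k]; decide),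
            show (b0 ++ b1 ++ b2) ++ x :: b99 = b0 ++ b1 ++ (b2 ++ [x]) ++ b99 by
              simp [List.append_assoc],
            ih b0 b1 (b2 ++ [x]) b99 (fun y hy => hl y (by simp [hy])) h0 h1
              (fun y hy => by
                rcases List.mem_append.1 hy with hy | hy
                · exact h2 y hy
                · simp at hy; simp [hy, k]) h99]
        simp [k, List.append_assoc]
      · have e : b0 ++ b1 ++ b2 ++ b99 = (b0 ++ b1 ++ b2 ++ b99) ++ [] := by simp
        rw [e, insertBy_split _ x (b0 ++ b1 ++ b2 ++ b99) []
              (fun y hy => by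
                rcases List.mem_append.1 hy with hy | hy
                · rcases List.mem_append.1 hy with hy | hy
                  · rcases List.mem_append.1 hy with hy | hy
                    · simp only [h0 y hy, k]; decide
                    · simp only [h1 y hy, k]; decide
                  · simp only [h2 y hy, k]; decide
                · simp only [h99 y hy, k]; decide)
              (fun y hy => by simp at hy),
            show (b0 ++ b1 ++ b2 ++ b99) ++ x :: [] = b0 ++ b1 ++ b2 ++ (b99 ++ [x]) by
              simp [List.append_assoc],
            ih b0 b1 b2 (b99 ++ [x]) (fun y hy => hl y (by simp [hy])) h0 h1 h2
              (fun y hy => by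
                rcases List.mem_append.1 hy with hy | hy
                · exact h99 y hy
                · simp at hy; simp [hy, k])]
        simp [k, List.append_assoc]

-- proof-only name for B's loop step
def pvStep (st : List String × List String × List String × List String)
    (p : String × List (String × String)) :
    List String × List String × List String × List String :=
  if pvCat p == "time" then (st.1 ++ [p.1], st.2.1, st.2.2.1, st.2.2.2)
  else if pvCat p == "product" then (st.1, st.2.1 ++ [p.1], st.2.2.1, st.2.2.2)
  else if pvCat p == "geographic" then (st.1, st.2.1, st.2.2.1 ++ [p.1], st.2.2.2)
  else (st.1, st.2.1, st.2.2.1, st.2.2.2 ++ [p.1])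

lemma alt_eq_pvStep (h : List (String × List (String × String))) :
    get_chunking_priority_py_alt h =
      (h.foldl pvStep ([], [], [], [])).1 ++ (h.foldl pvStep ([], [], [], [])).2.1
        ++ (h.foldl pvStep ([], [], [], [])).2.2.1 ++ (h.foldl pvStep ([], [], [], [])).2.2.2 := by
  rfl

-- what B's fold produces: the four bucket lists as filters of the input
lemma alt_fold (l : List (String × List (String × String))) :
    ∀ (c0 c1 c2 c3 : List String),
    l.foldl pvStep (c0, c1, c2, c3)
      = (c0 ++ (l.filter (fun p => pvPrio p == 0)).map (·.1),
         c1 ++ (l.filter (fun p => pvPrio p == 1)).map (·.1),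
         c2 ++ (l.filter (fun p => pvPrio p == 2)).map (·.1),
         c3 ++ (l.filter (fun p => pvPrio p == 99)).map (·.1)) := by
  induction l with
  | nil => intro c0 c1 c2 c3; simp
  | cons p t ih =>
      intro c0 c1 c2 c3
      rcases eq_or_ne (pvCat p) "time" with h1 | h1
      · rw [List.foldl_cons, show pvStep (c0, c1, c2, c3) p = (c0 ++ [p.1], c1, c2, c3) from by
              simp [pvStep, h1], ih]
        simp [pvPrio, h1, List.append_assoc]
      · rcases eq_or_ne (pvCat p) "product" with h2 | h2
        · rw [List.foldl_cons, show pvStep (c0, c1, c2, c3) p = (c0, c1 ++ [p.1], c2, c3) from by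
                simp [pvStep, h2], ih]
          simp [pvPrio, h2, List.append_assoc]
        · rcases eq_or_ne (pvCat p) "geographic" with h3 | h3
          · rw [List.foldl_cons, show pvStep (c0, c1, c2, c3) p = (c0, c1, c2 ++ [p.1], c3) from by
                  simp [pvStep, h3], ih]
            simp [pvPrio, h3, List.append_assoc]
          · rw [List.foldl_cons, show pvStep (c0, c1, c2, c3) p = (c0, c1, c2, c3 ++ [p.1]) from by
                  simp [pvStep, h1, h2, h3], ih]
            simp [pvPrio, h1, h2, h3, List.append_assoc]

-- ===== VERDICT (by name: the statement is the Claim_ definition above) =====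
theorem get_chunking_priority_py_spec : Claim_equal_get_chunking_priority_py := by
  intro h _
  unfold Spec_get_chunking_priority_py
  rw [show get_chunking_priority_py h = List.map (fun d => d.1)
        (PySem.List.sorted
          (h.foldl (fun dims p => dims ++ [(p.1,
            PySem.Dict.getD (⟨[("time", 0), ("product", 1), ("geographic", 2)]⟩ : PySem.Dict String Int)
              (PySem.Dict.getD (⟨p.2⟩ : PySem.Dict String String) "category" "other") 99)]) [])
          (fun x => x.2)) from rfl,
      PySem.List.foldl_append_singleton_eq_map, List.nil_append]
  have hmap : (h.map (fun p => (p.1,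
      PySem.Dict.getD (⟨[("time", 0), ("product", 1), ("geographic", 2)]⟩ : PySem.Dict String Int)
        (PySem.Dict.getD (⟨p.2⟩ : PySem.Dict String String) "category" "other") 99)))
      = h.map (fun p => (p.1, pvPrio p)) := by
    apply List.map_congr_left
    intro p _
    rw [pvPrio_eq]
    rfl
  have hsort := sort_buckets (h.map (fun p => (p.1, pvPrio p))) [] [] [] []
    (fun x hx => by
      rcases List.mem_map.1 hx with ⟨p, _, rfl⟩
      exact pvPrio_mem p)
    (by simp) (by simp) (by simp) (by simp)
  simp only [List.append_nil, List.nil_append] at hsort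
  rw [hmap, PySem.List.sorted_eq_foldl_insertBy, hsort, alt_eq_pvStep, alt_fold]
  simp [List.filter_map, Function.comp_def, List.map_map]
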